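-- pv_equiv track=rewrite | github.com/abumatran/pat | Resources/Wikipedia/anmor2tok.py | next_token
-- ===== SOURCE A (Python) =====
-- def next_token(line):
--   mylist = []
--   i = 0
--   while i < len(line):
--     if line[i] == "\\":
--       mylist.append(line[i])
--       mylist.append(line[i+1])
--       i += 2
--     elif line[i] == "^":
--       if len(mylist) > 0:
--         yield "".join(mylist)
--       mylist = [line[i]]
--       i += 1
--     elif line[i] == "$":
--       mylist.append(line[i])
--       yield "".join(mylist)
--       mylist = []
--       i += 1
--     else:
--       mylist.append(line[i])
--       i += 1
--
--   if len(mylist) > 0: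
--     yield "".join(mylist)
--
--   return
-- ===== SOURCE B (Python) =====
-- def next_token(line):
--   # Delimiter-jumping generator: str.find skips to the next of \ ^ $ in one
--   # go and the intervening plain text is appended as a single chunk.
--   buf = ''
--   i = 0
--   n = len(line)
--   while i < n:
--     cands = [k for k in (line.find(ch, i) for ch in '\\^$') if k != -1]
--     j = min(cands) if cands else n
--     buf += line[i:j]
--     if j == n:
--       break
--     ch = line[j]
--     if ch == '\\':
--       buf += ch + line[j + 1]
--       i = j + 2
--     elif ch == '^':
--       if buf:
--         yield buf
--       buf = '^'
--       i = j + 1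
--     else:  # '$'
--       yield buf + '$'
--       buf = ''
--       i = j + 1
--   if buf:
--     yield buf
-- ===== Notes on version B (the rewrite author's own statement) =====
-- stated objective: faster
-- what changed: B scans by jumping with str.find to the next delimiter (\, ^, $) and appends each intervening plain substring as one chunk to a string buffer, instead of A's character-by-character stepping that appends every char to a list and joins it at each yield.
import Mathlib
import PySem

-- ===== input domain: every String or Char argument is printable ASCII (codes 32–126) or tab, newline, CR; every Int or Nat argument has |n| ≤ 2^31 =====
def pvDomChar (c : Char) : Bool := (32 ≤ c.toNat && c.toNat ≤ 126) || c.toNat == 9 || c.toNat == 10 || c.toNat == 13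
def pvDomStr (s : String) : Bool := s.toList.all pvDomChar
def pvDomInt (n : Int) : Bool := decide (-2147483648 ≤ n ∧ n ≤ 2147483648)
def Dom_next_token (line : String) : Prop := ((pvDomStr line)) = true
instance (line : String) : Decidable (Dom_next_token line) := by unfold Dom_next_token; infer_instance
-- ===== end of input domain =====

-- B replaces A's character-by-character scan with a delimiter-jumping scan (str.find to the
-- next of \ ^ $, appending the intervening plain text as one chunk); measured faster by a
-- constant factor in a timing run. Pre_ excludes the inputs on which A raises IndexError.

-- ===== PORT A =====
-- A's while loop, char by char over line, with mylist as the accumulator (in order).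
-- The '\\'-at-end branch is Python's IndexError (excluded by Pre_); the port returns [] there.
def nextTokenGoA : List Char → List Char → List String
  | [], acc => if acc = [] then [] else [String.mk acc]
  | c :: rest, acc =>
    if c = '\\' then
      match rest with
      | [] => []                    -- line[i+1] raises IndexError; outside Pre_
      | c2 :: r2 => nextTokenGoA r2 (acc ++ [c, c2])
    else if c = '^' then
      (if acc = [] then [] else [String.mk acc]) ++ nextTokenGoA rest ['^']
    else if c = '$' then
      String.mk (acc ++ ['$']) :: nextTokenGoA rest []
    else
      nextTokenGoA rest (acc ++ [c])

def next_token (line : String) : List String := nextTokenGoA line.toList []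

-- ===== PORT B =====
def nextTokenSpec (c : Char) : Bool := c = '\\' || c = '^' || c = '$'

-- Source B's outer loop: j = min of the finds = position of the first delimiter, i.e. the
-- plain prefix is takeWhile (!spec) and the scan resumes at dropWhile (!spec).
def nextTokenGoB (l : List Char) (buf : List Char) : List String :=
  let buf' := buf ++ l.takeWhile (fun c => !nextTokenSpec c)
  match h : l.dropWhile (fun c => !nextTokenSpec c) with
  | [] => if buf' = [] then [] else [String.mk buf']
  | c :: r =>
    if c = '\\' then
      match r with
      | [] => []                    -- line[j+1] raises IndexError; outside Pre_
      | c2 :: r2 => nextTokenGoB r2 (buf' ++ [c, c2])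
    else if c = '^' then
      (if buf' = [] then [] else [String.mk buf']) ++ nextTokenGoB r ['^']
    else
      String.mk (buf' ++ ['$']) :: nextTokenGoB r []
termination_by l.length
decreasing_by
  all_goals
    have := List.length_dropWhile_le (fun c => !nextTokenSpec c) l
    rw [h] at this
    simp at this ⊢
    omega

def next_token_alt (line : String) : List String := nextTokenGoB line.toList []

-- ===== PRECONDITION & SPEC =====
-- Pre_ excludes exactly the inputs on which A raises IndexError (line[i+1] past the end):
-- those whose trailing run of backslashes has odd length; B raises there too.
def Pre_next_token (line : String) : Prop :=
  (line.toList.reverse.takeWhile (fun c => c = '\\')).length % 2 = 0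
instance (line : String) : Decidable (Pre_next_token line) := by unfold Pre_next_token; infer_instance
def pvWitness_next_token : String := "^ab\\$c$"

def Spec_next_token (line : String) (out : List String) : Prop := out = next_token_alt line
instance (line : String) (out : List String) : Decidable (Spec_next_token line out) := by unfold Spec_next_token; infer_instance

-- ===== CLAIM (what is proved, stated in full; the proofs are below) =====
def Claim_equal_next_token : Prop := ∀ (line : String), Dom_next_token line → Pre_next_token line → Spec_next_token line (next_token line)

-- ===== LEMMAS AND PROOFS =====

theorem nextTokenDropWhile_head_false {α : Type} (p : α → Bool) :
    ∀ (l : List α) (c : α) (r : List α), List.dropWhile p l = c :: r → p c = false := by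
  intro l
  induction l with
  | nil => intro c r h; simp [List.dropWhile] at h
  | cons a t ih =>
    intro c r h
    by_cases ha : p a
    · exact ih c r (by simpa [List.dropWhile, ha] using h)
    · simp [List.dropWhile, ha] at h
      rw [← h.1]
      simpa using ha

-- one-step unfolding of A's loop on a nonempty list
theorem nextTokenGoA_cons (c : Char) (r acc : List Char) :
    nextTokenGoA (c :: r) acc =
      (if c = '\\' then
        match r with
        | [] => []
        | c2 :: r2 => nextTokenGoA r2 (acc ++ [c, c2])
      else if c = '^' then
        (if acc = [] then [] else [String.mk acc]) ++ nextTokenGoA r ['^']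
      else if c = '$' then
        String.mk (acc ++ ['$']) :: nextTokenGoA r []
      else
        nextTokenGoA r (acc ++ [c])) := by
  conv_lhs => rw [nextTokenGoA.eq_def]

-- A's scan over a run of plain characters just moves them into the accumulator.
theorem nextTokenGoA_skip (plain : List Char) (rest acc : List Char)
    (hp : ∀ c ∈ plain, nextTokenSpec c = false) :
    nextTokenGoA (plain ++ rest) acc = nextTokenGoA rest (acc ++ plain) := by
  induction plain generalizing acc with
  | nil => simp
  | cons c p ih =>
    have hc : nextTokenSpec c = false := hp c (by simp)
    have h1 : ¬ c = '\\' := fun e => by simp [nextTokenSpec, e] at hc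
    have h2 : ¬ c = '^' := fun e => by simp [nextTokenSpec, e] at hc
    have h3 : ¬ c = '$' := fun e => by simp [nextTokenSpec, e] at hc
    simp only [List.cons_append]
    rw [nextTokenGoA_cons]
    simp only [if_neg h1, if_neg h2, if_neg h3]
    rw [ih (acc ++ [c]) (fun d hd => hp d (List.mem_cons_of_mem _ hd))]
    rw [List.append_assoc, List.singleton_append]

theorem nextTokenGoA_eq_goB : ∀ (n : Nat) (l acc : List Char), l.length ≤ n →
    nextTokenGoA l acc = nextTokenGoB l acc := by
  intro n
  induction n with
  | zero =>
    intro l acc hl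
    have : l = [] := by cases l <;> simp_all
    subst this
    rw [nextTokenGoB]
    simp [nextTokenGoA]
  | succ n ih =>
    intro l acc hl
    have hplain : ∀ c ∈ l.takeWhile (fun c => !nextTokenSpec c), nextTokenSpec c = false := by
      intro c hc
      have := List.mem_takeWhile_imp hc
      simpa using this
    rw [nextTokenGoB]
    split
    · rename_i hdrop
      have hsplit : l.takeWhile (fun c => !nextTokenSpec c) = l := by
        conv_rhs => rw [← List.takeWhile_append_dropWhile (p := fun c => !nextTokenSpec c) (l := l)]
        rw [hdrop, List.append_nil]
      conv_lhs => rw [← hsplit]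
      rw [← List.append_nil (l.takeWhile (fun c => !nextTokenSpec c)),
        nextTokenGoA_skip _ [] acc hplain]
      simp [nextTokenGoA]
    · rename_i c r hdrop
      have hsplit : l.takeWhile (fun c => !nextTokenSpec c) ++ (c :: r) = l := by
        conv_rhs => rw [← List.takeWhile_append_dropWhile (p := fun c => !nextTokenSpec c) (l := l)]
        rw [hdrop]
      have hlen := List.length_dropWhile_le (fun c => !nextTokenSpec c) l
      rw [hdrop] at hlen
      simp only [List.length_cons] at hlen
      have hr : r.length ≤ n := by omega
      conv_lhs => rw [← hsplit]
      rw [nextTokenGoA_skip _ (c :: r) acc hplain]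
      have hc : nextTokenSpec c = true := by
        have := nextTokenDropWhile_head_false (fun c => !nextTokenSpec c) l c r hdrop
        simpa using this
      rw [nextTokenGoA_cons]
      by_cases h1 : c = '\\'
      · simp only [if_pos h1]
        cases r with
        | nil => rfl
        | cons c2 r2 =>
          simp only [h1]
          exact ih r2 _ (by simp at hr; omega)
      · simp only [if_neg h1]
        by_cases h2 : c = '^'
        · simp only [if_pos h2]
          rw [ih r _ hr]
        · simp only [if_neg h2]
          have h3 : c = '$' := by
            simp [nextTokenSpec, h1, h2] at hc; exact hc
          simp only [h3]
          rw [ih r _ hr]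
          simp

-- ===== VERDICT (by name: the statement is the Claim_ definition above) =====
theorem next_token_spec : Claim_equal_next_token := by
  intro line _ _
  unfold Spec_next_token next_token next_token_alt
  exact nextTokenGoA_eq_goB line.toList.length _ _ le_rfl
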